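-- pv_equiv track=rewrite | github.com/ankkalampi/algolabra-shakki | src/precomputation.py | precompute_single_rook_attack_table
-- ===== SOURCE A (Python) =====
-- def precompute_single_rook_attack_table(square):
--     """
--     Compute and return an attack table (bitboard)
--     for rook in a specific square
--
--     Args:
--     square: the square index (integer, in range (0,64))
--
--     Returns:
--     bitboard: 64-bit bitboard representation of attack board/table
--     """
--     bitboard = 0
--
--     # get rank and file of the square
--     rank = square // 8
--     file = square % 8
--
--     space_right = file      # number of squares to the right
--     space_left = 7 - file   # number of squares to the left
--     space_down = rank       # number of squares below
--     space_up = 7 - rank     # number of squares above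
--
--     # lengths of directions
--     # order: up, right, down, left
--     direction_lengths = [space_up,
--                             space_right,
--                             space_down,
--                             space_left]
--
--     # scalars for directional bit shifts
--     # order: up, right, down, left
--     direction_scalars = [8, -1, -8, 1]
--
--     for direction in range(0,4):
--         for move in range(1, direction_lengths[direction] +1):
--             temp_bitboard = 0
--             temp_bitboard |= (1 << square)
--             if direction_scalars[direction] < 0:
--                 move_bitboard = (temp_bitboard >> (move * abs(direction_scalars[direction]))) & 0xFFFFFFFFFFFFFFFF # masking makes sure no extra bits are added
--             else:
--                 move_bitboard = (temp_bitboard << (move * direction_scalars[direction])) & 0xFFFFFFFFFFFFFFFF # masking makes sure no extra bits are added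
--             bitboard |= move_bitboard
--
--
--
--     return bitboard
-- ===== SOURCE B (Python) =====
-- def precompute_single_rook_attack_table(square):
--     """
--     Rook attack bitboard for `square`: whole rank mask OR whole file mask,
--     with the square's own bit toggled off (both masks contain it, so XOR
--     clears exactly that bit), kept within 64 bits.
--     """
--     rank, file = divmod(square, 8)
--     mask = (0xFF << (rank * 8)) | (0x0101010101010101 << file)
--     return (mask ^ (1 << square)) & 0xFFFFFFFFFFFFFFFF
-- ===== Notes on version B (the rewrite author's own statement) =====
-- stated objective: simpler
-- what changed: Replaces the four directional move-by-move shift loops with a closed-form rank mask (0xFF << 8*rank) OR file mask (0x0101010101010101 << file), XOR-ing the square's own bit off and masking to 64 bits.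
import Mathlib
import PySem

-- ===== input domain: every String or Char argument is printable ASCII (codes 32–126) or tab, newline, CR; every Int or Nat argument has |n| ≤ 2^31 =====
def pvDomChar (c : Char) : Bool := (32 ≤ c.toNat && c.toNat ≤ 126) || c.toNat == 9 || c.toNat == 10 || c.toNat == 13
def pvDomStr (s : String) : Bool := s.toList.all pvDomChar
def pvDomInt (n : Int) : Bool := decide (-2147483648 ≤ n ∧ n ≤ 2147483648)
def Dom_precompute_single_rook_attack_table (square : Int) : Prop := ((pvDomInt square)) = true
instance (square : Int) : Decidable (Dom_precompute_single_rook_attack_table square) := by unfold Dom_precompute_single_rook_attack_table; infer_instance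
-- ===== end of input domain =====

-- B replaces A's four directional step-by-step shift loops with a closed-form rank mask OR file
-- mask, XOR-ing the square's own bit off (objective: simpler). A = B is proved on all square ≥ 0.

-- ===== PORT A =====
-- literal transliteration of A; `square.toNat` is exact on Pre_ (square ≥ 0: Python raises
-- ValueError on a negative shift count, so square < 0 is outside Pre_).
def precompute_single_rook_attack_table (square : Int) : Int :=
  let rank := PySem.Int.floordiv square 8
  let file := PySem.Int.mod square 8
  let space_right := file
  let space_left := 7 - file
  let space_down := rank
  let space_up := 7 - rank
  let direction_lengths : List Int := [space_up, space_right, space_down, space_left]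
  let direction_scalars : List Int := [8, -1, -8, 1]
  (PySem.List.pyRange 0 4 1).foldl (fun bitboard direction =>
    (PySem.List.pyRange 1 (PySem.List.pyGetD direction_lengths direction 0 + 1) 1).foldl
      (fun bb move =>
        let temp_bitboard : Int := PySem.Int.bor 0 ((1 : Int) <<< square.toNat)
        let scalar := PySem.List.pyGetD direction_scalars direction 0
        let move_bitboard : Int :=
          if scalar < 0 then
            PySem.Int.band (temp_bitboard >>> (move * |scalar|).toNat) 0xFFFFFFFFFFFFFFFF
          else
            PySem.Int.band (temp_bitboard <<< (move * scalar).toNat) 0xFFFFFFFFFFFFFFFF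
        PySem.Int.bor bb move_bitboard)
      bitboard) 0

-- ===== PORT B =====
def precompute_single_rook_attack_table_alt (square : Int) : Int :=
  let rank := PySem.Int.floordiv square 8
  let file := PySem.Int.mod square 8
  let mask := PySem.Int.bor ((0xFF : Int) <<< (rank * 8).toNat) ((0x0101010101010101 : Int) <<< file.toNat)
  PySem.Int.band (PySem.Int.bxor mask ((1 : Int) <<< square.toNat)) 0xFFFFFFFFFFFFFFFF

-- ===== PRECONDITION & SPEC =====
-- Pre_ excludes exactly square < 0, where Python's `1 << square` raises ValueError.
def Pre_precompute_single_rook_attack_table (square : Int) : Prop := 0 ≤ square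
instance (square : Int) : Decidable (Pre_precompute_single_rook_attack_table square) := by unfold Pre_precompute_single_rook_attack_table; infer_instance
def pvWitness_precompute_single_rook_attack_table : Int := 27
def Spec_precompute_single_rook_attack_table (square : Int) (out : Int) : Prop := out = precompute_single_rook_attack_table_alt square
instance (square : Int) (out : Int) : Decidable (Spec_precompute_single_rook_attack_table square out) := by unfold Spec_precompute_single_rook_attack_table; infer_instance

-- ===== CLAIM (what is proved, stated in full; the proofs are below) =====
def Claim_equal_precompute_single_rook_attack_table : Prop := ∀ (square : Int), Dom_precompute_single_rook_attack_table square → Pre_precompute_single_rook_attack_table square → Spec_precompute_single_rook_attack_table square (precompute_single_rook_attack_table square)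

-- ===== LEMMAS AND PROOFS =====

def M64 : Nat := 18446744073709551615

lemma shl_cast (n k : Nat) : ((n:Int) <<< k) = ((n <<< k : Nat) : Int) := by
  simp [Int.shiftLeft_eq, Nat.shiftLeft_eq, push_cast]

lemma shr_cast (n k : Nat) : ((n:Int) >>> k) = ((n >>> k : Nat) : Int) := by
  simp [Int.shiftRight_eq_div_pow, Nat.shiftRight_eq_div_pow]

lemma band_M_cast (n : Nat) :
    PySem.Int.band (↑n) 18446744073709551615 = ((n &&& M64 : Nat) : Int) := by
  rw [PySem.Int.band_of_nonneg (Int.natCast_nonneg _) (by norm_num), Int.toNat_natCast]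
  rfl

lemma foldl_bor_cast (gn : Int → Nat) (l : List Int) (init : Int) (initn : Nat)
    (hinit : init = ↑initn) :
    List.foldl (fun bb m => PySem.Int.bor bb (↑(gn m))) init l
      = ↑(List.foldl (fun bb m => bb ||| gn m) initn l) := by
  subst hinit
  induction l generalizing initn with
  | nil => rfl
  | cons a t ih =>
      simp only [List.foldl_cons, PySem.Int.bor_natCast]
      exact ih _

lemma foldl_bor_cast0 (gn : Int → Nat) (l : List Int) :
    List.foldl (fun bb m => PySem.Int.bor bb (↑(gn m))) (0 : Int) l
      = ↑(List.foldl (fun bb m => bb ||| gn m) (0 : Nat) l) :=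
  foldl_bor_cast gn l 0 0 (by norm_num)

def ANat (s : Nat) : Nat :=
  (PySem.List.pyRange 1 (7 - PySem.Int.mod (s:Int) 8 + 1) 1).foldl
    (fun bb m => bb ||| ((1 <<< s) <<< (m * 1).toNat &&& M64))
    ((PySem.List.pyRange 1 (PySem.Int.floordiv (s:Int) 8 + 1) 1).foldl
      (fun bb m => bb ||| ((1 <<< s) >>> (m * 8).toNat &&& M64))
      ((PySem.List.pyRange 1 (PySem.Int.mod (s:Int) 8 + 1) 1).foldl
        (fun bb m => bb ||| ((1 <<< s) >>> (m * 1).toNat &&& M64))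
        ((PySem.List.pyRange 1 (7 - PySem.Int.floordiv (s:Int) 8 + 1) 1).foldl
          (fun bb m => bb ||| ((1 <<< s) <<< (m * 8).toNat &&& M64))
          0)))

lemma pyGetD4 (a b c d : Int) :
    PySem.List.pyGetD [a,b,c,d] 0 0 = a ∧ PySem.List.pyGetD [a,b,c,d] 1 0 = b ∧
    PySem.List.pyGetD [a,b,c,d] 2 0 = c ∧ PySem.List.pyGetD [a,b,c,d] 3 0 = d :=
  ⟨rfl, rfl, rfl, rfl⟩

lemma A_toNat (s : Nat) : precompute_single_rook_attack_table (↑s) = ↑(ANat s) := by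
  simp only [precompute_single_rook_attack_table]
  have hr4 : PySem.List.pyRange 0 4 1 = [0,1,2,3] := by decide
  rw [hr4]
  have hz : ∀ x : Int, PySem.Int.bor 0 x = x := fun x => by
    rw [PySem.Int.bor_comm, PySem.Int.bor_zero]
  have h1 : (1:Int) <<< s = ((1 <<< s : Nat) : Int) := shl_cast 1 s
  simp only [List.foldl_cons, List.foldl_nil, hz, Int.toNat_natCast,
    (pyGetD4 (7 - PySem.Int.floordiv (s:Int) 8) (PySem.Int.mod (s:Int) 8) (PySem.Int.floordiv (s:Int) 8) (7 - PySem.Int.mod (s:Int) 8)).1,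
    (pyGetD4 (7 - PySem.Int.floordiv (s:Int) 8) (PySem.Int.mod (s:Int) 8) (PySem.Int.floordiv (s:Int) 8) (7 - PySem.Int.mod (s:Int) 8)).2.1,
    (pyGetD4 (7 - PySem.Int.floordiv (s:Int) 8) (PySem.Int.mod (s:Int) 8) (PySem.Int.floordiv (s:Int) 8) (7 - PySem.Int.mod (s:Int) 8)).2.2.1,
    (pyGetD4 (7 - PySem.Int.floordiv (s:Int) 8) (PySem.Int.mod (s:Int) 8) (PySem.Int.floordiv (s:Int) 8) (7 - PySem.Int.mod (s:Int) 8)).2.2.2,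
    (pyGetD4 (8:Int) (-1) (-8) 1).1, (pyGetD4 (8:Int) (-1) (-8) 1).2.1,
    (pyGetD4 (8:Int) (-1) (-8) 1).2.2.1, (pyGetD4 (8:Int) (-1) (-8) 1).2.2.2,
    show ((8:Int) < 0) = False from by norm_num,
    show ((-1:Int) < 0) = True from by norm_num,
    show ((-8:Int) < 0) = True from by norm_num,
    show |(-1:Int)| = 1 from by norm_num,
    show |(-8:Int)| = 8 from by norm_num,
    show ((1:Int) < 0) = False from by norm_num,
    if_true, if_false, h1, shl_cast, shr_cast, band_M_cast]
  unfold ANat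
  rw [foldl_bor_cast0]
  rw [foldl_bor_cast _ _ _ _ rfl]
  rw [foldl_bor_cast _ _ _ _ rfl]
  rw [foldl_bor_cast _ _ _ _ rfl]

def BNat (s : Nat) : Nat :=
  ((255 <<< (s / 8 * 8) ||| 72340172838076673 <<< (s % 8)) ^^^ (1 <<< s)) &&& M64

lemma B_toNat (s : Nat) : precompute_single_rook_attack_table_alt (↑s) = ↑(BNat s) := by
  simp only [precompute_single_rook_attack_table_alt]
  rw [show PySem.Int.floordiv (↑s) 8 = ((s / 8 : Nat) : Int) from by
        exact_mod_cast PySem.Int.floordiv_natCast s 8,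
      show PySem.Int.mod (↑s) 8 = ((s % 8 : Nat) : Int) from by
        exact_mod_cast PySem.Int.mod_natCast s 8]
  rw [show ((s / 8 : Nat) : Int) * 8 = ((s / 8 * 8 : Nat) : Int) from by push_cast; ring]
  simp only [Int.toNat_natCast,
    show ((255:Int)) = ((255:Nat):Int) from rfl,
    show ((72340172838076673:Int)) = ((72340172838076673:Nat):Int) from rfl,
    show ((1:Int)) = ((1:Nat):Int) from rfl,
    shl_cast, PySem.Int.bor_natCast, PySem.Int.bxor_natCast, band_M_cast]
  rfl

lemma testBit_foldl_or (g : Int → Nat) (l : List Int) (init i : Nat) :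
    (List.foldl (fun bb m => bb ||| g m) init l).testBit i
      = (init.testBit i || l.any fun m => (g m).testBit i) := by
  induction l generalizing init with
  | nil => simp
  | cons a t ih => simp [ih, Nat.testBit_or, Bool.or_assoc]

lemma testBit_shl_term (s k i : Nat) :
    ((1 <<< s) <<< k &&& M64).testBit i = (decide (i < 64) && decide (i = s + k)) := by
  rw [show M64 = 2 ^ 64 - 1 from rfl, Nat.testBit_and, Nat.testBit_shiftLeft,
    Nat.one_shiftLeft, Nat.testBit_two_pow, Nat.testBit_two_pow_sub_one]
  by_cases h64 : i < 64 <;> by_cases hk : k ≤ i <;>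
    by_cases he : i = s + k <;> simp [h64, hk, he] <;> omega

lemma testBit_shr_term (s k i : Nat) :
    ((1 <<< s) >>> k &&& M64).testBit i = (decide (i < 64) && decide (i + k = s)) := by
  rw [show M64 = 2 ^ 64 - 1 from rfl, Nat.testBit_and, Nat.testBit_shiftRight,
    Nat.one_shiftLeft, Nat.testBit_two_pow, Nat.testBit_two_pow_sub_one]
  by_cases h64 : i < 64 <;> by_cases he : i + k = s <;> simp [h64, he] <;> omega

-- attack-set membership predicates
def PA (s i : Nat) : Prop :=
  (∃ m : Int, (1 ≤ m ∧ m < 7 - ((s / 8 : Nat) : Int) + 1) ∧ i < 64 ∧ i = s + (m * 8).toNat) ∨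
  (∃ m : Int, (1 ≤ m ∧ m < ((s % 8 : Nat) : Int) + 1) ∧ i < 64 ∧ i + (m * 1).toNat = s) ∨
  (∃ m : Int, (1 ≤ m ∧ m < ((s / 8 : Nat) : Int) + 1) ∧ i < 64 ∧ i + (m * 8).toNat = s) ∨
  (∃ m : Int, (1 ≤ m ∧ m < 7 - ((s % 8 : Nat) : Int) + 1) ∧ i < 64 ∧ i = s + (m * 1).toNat)

lemma ANat_bit (s i : Nat) : (ANat s).testBit i = true ↔ PA s i := by
  unfold ANat
  rw [show PySem.Int.floordiv (↑s) 8 = ((s / 8 : Nat) : Int) from by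
        exact_mod_cast PySem.Int.floordiv_natCast s 8,
      show PySem.Int.mod (↑s) 8 = ((s % 8 : Nat) : Int) from by
        exact_mod_cast PySem.Int.mod_natCast s 8]
  simp only [testBit_foldl_or, testBit_shl_term, testBit_shr_term, Nat.zero_testBit,
    Bool.false_or, Bool.or_eq_true, List.any_eq_true, PySem.List.mem_pyRange_one,
    Bool.and_eq_true, decide_eq_true_eq, PA]
  simp only [or_assoc]

def PB (s i : Nat) : Prop :=
  i < 64 ∧ ((s / 8 * 8 ≤ i ∧ i - s / 8 * 8 < 8 ∨
             s % 8 ≤ i ∧ i - s % 8 < 64 ∧ (i - s % 8) % 8 = 0) ↔ ¬ i = s)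

lemma bit255 (j : Nat) : (255:Nat).testBit j = decide (j < 8) := by
  rcases Nat.lt_or_ge j 8 with h | h
  · interval_cases j <;> decide
  · rw [Nat.testBit_eq_false_of_lt (by calc (255:Nat) < 2 ^ 8 := by norm_num
        _ ≤ 2 ^ j := Nat.pow_le_pow_right (by norm_num) h)]
    simp; omega

lemma bitCol (j : Nat) : (72340172838076673:Nat).testBit j
    = (decide (j < 64) && decide (j % 8 = 0)) := by
  rcases Nat.lt_or_ge j 64 with h | h
  · have : ∀ j : Nat, j < 64 → ((72340172838076673:Nat).testBit j
        = (decide (j < 64) && decide (j % 8 = 0))) := by decide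
    exact this j h
  · rw [Nat.testBit_eq_false_of_lt (by calc (72340172838076673:Nat) < 2 ^ 64 := by norm_num
        _ ≤ 2 ^ j := Nat.pow_le_pow_right (by norm_num) h)]
    simp; omega

lemma BNat_bit (s i : Nat) : (BNat s).testBit i = true ↔ PB s i := by
  unfold BNat PB
  rw [show M64 = 2 ^ 64 - 1 from rfl, Nat.testBit_and, Nat.testBit_xor, Nat.testBit_or,
    Nat.testBit_shiftLeft, Nat.testBit_shiftLeft, Nat.one_shiftLeft, Nat.testBit_two_pow,
    Nat.testBit_two_pow_sub_one, bit255, bitCol]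
  by_cases h64 : i < 64 <;> by_cases hs : s = i <;>
    by_cases h1 : s / 8 * 8 ≤ i <;> by_cases h2 : s % 8 ≤ i <;>
      simp [h64, hs, h1, h2] <;> omega

lemma key (s i : Nat) : PA s i ↔ PB s i := by
  unfold PA PB
  constructor
  · rintro (⟨m, hm, h64, he⟩ | ⟨m, hm, h64, he⟩ | ⟨m, hm, h64, he⟩ | ⟨m, hm, h64, he⟩) <;>
      exact ⟨h64, by constructor <;> intro _ <;> omega⟩
  · rintro ⟨h64, hiff⟩
    by_cases hs : i = s
    · exfalso
      have := hiff.mpr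
      omega
    · have hmask := hiff.mpr hs
      rcases hmask with ⟨hlo, hhi⟩ | ⟨hlo, hhi, hdvd⟩
      · rcases Nat.lt_or_ge i s with hl | hg
        · refine Or.inr (Or.inl ⟨((s - i : Nat) : Int), by constructor <;> omega, h64, by omega⟩)
        · refine Or.inr (Or.inr (Or.inr ⟨((i - s : Nat) : Int), by constructor <;> omega, h64, by omega⟩))
      · rcases Nat.lt_or_ge i s with hl | hg
        · refine Or.inr (Or.inr (Or.inl ⟨(((s - i) / 8 : Nat) : Int), by constructor <;> omega, h64, by omega⟩))
        · refine Or.inl ⟨(((i - s) / 8 : Nat) : Int), by constructor <;> omega, h64, by omega⟩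

lemma AB (s : Nat) : ANat s = BNat s :=
  Nat.eq_of_testBit_eq fun i => by
    rw [Bool.eq_iff_iff, ANat_bit, BNat_bit]; exact key s i

-- ===== VERDICT (by name: the statement is the Claim_ definition above) =====
theorem precompute_single_rook_attack_table_spec : Claim_equal_precompute_single_rook_attack_table := by
  intro square _ hpre
  unfold Spec_precompute_single_rook_attack_table
  lift square to Nat using hpre with s
  rw [A_toNat, B_toNat, AB]
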